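-- pv_equiv track=rewrite | github.com/JangHyoSeong/codingTest | Programmers/Lv2/완전범죄/source.py | solution
-- ===== SOURCE A (Python) =====
-- def solution(info, n, m):
--     INF = int(1e9)
--     N = len(info)
--
--     dp = [[INF] * m for _ in range(N+1)]
--     dp[0][0] = 0
--
--     for i in range(N):
--         cost_a, cost_b = info[i]
--
--         for b in range(m):
--             if dp[i][b] == INF:
--                 continue
--
--             if dp[i][b] + cost_a < n:
--                 dp[i+1][b] = min(dp[i+1][b], dp[i][b] + cost_a)
--
--             if b + cost_b < m:
--                 dp[i+1][b + cost_b] = min(dp[i+1][b + cost_b], dp[i][b])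
--     result = min(dp[N])
--
--     return result if result != INF else -1
-- ===== SOURCE B (Python) =====
-- def solution(info, n, m):
--     # Reachable-state search: keep the set of achievable (A-trace, B-trace)
--     # pairs instead of a dense DP table; answer is the least A-trace reached.
--     states = {(0, 0)}
--     for cost_a, cost_b in info:
--         nxt = set()
--         for a, b in states:
--             if a + cost_a < n:
--                 nxt.add((a + cost_a, b))
--             if b + cost_b < m:
--                 nxt.add((a, b + cost_b))
--         states = nxt
--     return min((a for a, b in states), default=-1)
-- ===== Notes on version B (the rewrite author's own statement) =====
-- stated objective: alternative
-- what changed: A fills a dense (N+1) x m DP table whose cell [i][b] holds the minimum A-trace reaching B-trace b, with an INF sentinel and a final min-scan; B instead maintains the explicit set of reachable (A-trace, B-trace) pairs and returns the least first coordinate (no table, no sentinel).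
-- outside the precondition, e.g. on solution([[5, -1], [9, 1]], 10, 3): A returns 5, B returns 0; on solution([[1000000000, 5]], 1100000000, 1): A returns -1, B returns 1000000000
import Mathlib
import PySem

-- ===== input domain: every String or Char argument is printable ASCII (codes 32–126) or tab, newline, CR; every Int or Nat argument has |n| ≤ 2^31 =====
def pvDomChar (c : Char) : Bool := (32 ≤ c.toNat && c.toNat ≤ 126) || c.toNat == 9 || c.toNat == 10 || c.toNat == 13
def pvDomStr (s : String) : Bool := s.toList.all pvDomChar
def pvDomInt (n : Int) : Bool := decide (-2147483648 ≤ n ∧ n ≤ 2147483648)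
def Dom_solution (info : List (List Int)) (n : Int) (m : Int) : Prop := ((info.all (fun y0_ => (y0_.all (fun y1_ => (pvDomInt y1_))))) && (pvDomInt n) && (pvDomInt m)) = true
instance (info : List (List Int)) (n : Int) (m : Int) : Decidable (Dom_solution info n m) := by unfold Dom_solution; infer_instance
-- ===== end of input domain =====

-- B replaces A's dense (N+1)×m DP table by a search over the set of reachable
-- (A-trace, B-trace) pairs (objective: alternative algorithm, simpler state).

-- ===== PORT A =====
-- Literal port of A. dp is the (N+1)×m table; [INF]*m is List.replicate m.toNat INF
-- (exact: a non-positive repeat count gives [] in Python too). Index accesses use the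
-- total pyGetD/pySetD forms: under Pre_solution every index Python touches is in range
-- (dp[0][0] needs m ≥ 1; inner indices b, b+cost_b lie in [0,m) since costs are ≥ 0),
-- and min(dp[N]) is PySem.List.min? (dp[N] is nonempty under Pre_solution).
def solution (info : List (List Int)) (n : Int) (m : Int) : Int :=
  let INF : Int := 1000000000
  let N : Int := PySem.List.len info
  let dp : List (List Int) := (PySem.List.pyRange 0 (N+1) 1).map (fun _ => List.replicate m.toNat INF)
  let dp := PySem.List.pySetD dp 0 (PySem.List.pySetD (PySem.List.pyGetD dp 0 []) 0 0)
  let dp := (PySem.List.pyRange 0 N 1).foldl (fun dp i =>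
    let row := PySem.List.pyGetD info i []
    let cost_a := PySem.List.pyGetD row 0 0
    let cost_b := PySem.List.pyGetD row 1 0
    (PySem.List.pyRange 0 m 1).foldl (fun dp b =>
      let v := PySem.List.pyGetD (PySem.List.pyGetD dp i []) b 0
      if v = INF then dp
      else
        let dp := if v + cost_a < n then
            PySem.List.pySetD dp (i+1) (PySem.List.pySetD (PySem.List.pyGetD dp (i+1) []) b
              (min (PySem.List.pyGetD (PySem.List.pyGetD dp (i+1) []) b 0) (v + cost_a)))
          else dp
        if b + cost_b < m then
            PySem.List.pySetD dp (i+1) (PySem.List.pySetD (PySem.List.pyGetD dp (i+1) []) (b + cost_b)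
              (min (PySem.List.pyGetD (PySem.List.pyGetD dp (i+1) []) (b + cost_b) 0) v))
          else dp) dp) dp
  let result := (PySem.List.min? (PySem.List.pyGetD dp N []) (fun x => x)).getD 0
  if result ≠ INF then result else -1

-- ===== PORT B =====
-- Port of B (Source B): fold over info maintaining the PySem.Set of reachable
-- (A-trace, B-trace) pairs; the final min over first coordinates is order-independent,
-- so consuming the Set with min(..., default=-1) = PySem.List.minD is exact.
def solution_alt (info : List (List Int)) (n : Int) (m : Int) : Int :=
  let states : PySem.Set (Int × Int) := PySem.Set.ofList [((0 : Int), (0 : Int))]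
  let states := info.foldl (fun states r =>
    let cost_a := PySem.List.pyGetD r 0 0
    let cost_b := PySem.List.pyGetD r 1 0
    states.foldl (fun nxt p =>
      let nxt := if p.1 + cost_a < n then PySem.Set.add nxt (p.1 + cost_a, p.2) else nxt
      if p.2 + cost_b < m then PySem.Set.add nxt (p.1, p.2 + cost_b) else nxt)
      PySem.Set.empty) states
  PySem.List.minD (states.map (fun p => p.1)) (fun x => x) (-1)

-- ===== PRECONDITION & SPEC =====
-- Pre_ keeps the problem's natural domain: every info row is a pair [cost_a, cost_b]
-- with cost_b ≥ 0 (on a negative cost_b A's dp[i+1][b+cost_b] silently wraps to a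
-- different column, or raises), m ≥ 1 (otherwise A raises IndexError at dp[0][0]), and
-- n ≤ 10^9 (beyond that A's INF sentinel collides with genuine A-trace values and A can
-- return -1 for a feasible input).
def Pre_solution (info : List (List Int)) (n : Int) (m : Int) : Prop :=
  1 ≤ m ∧ n ≤ 1000000000 ∧ ∀ r ∈ info, r.length = 2 ∧ 0 ≤ r.getD 1 0
instance (info : List (List Int)) (n : Int) (m : Int) : Decidable (Pre_solution info n m) := by unfold Pre_solution; infer_instance
def pvWitness_solution : List (List Int) × Int × Int := ([[2, 3], [1, 1]], 4, 5)

def Spec_solution (info : List (List Int)) (n : Int) (m : Int) (out : Int) : Prop := out = solution_alt info n m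
instance (info : List (List Int)) (n : Int) (m : Int) (out : Int) : Decidable (Spec_solution info n m out) := by unfold Spec_solution; infer_instance

-- ===== CLAIM (what is proved, stated in full; the proofs are below) =====
def Claim_equal_solution : Prop := ∀ (info : List (List Int)) (n : Int) (m : Int), Dom_solution info n m → Pre_solution info n m → Spec_solution info n m (solution info n m)
-- ===== LEMMAS AND PROOFS =====

def Walk (n m : Int) : (Int × Int) → List (Int × Int) → (Int × Int) → Prop
  | p, [], q => q = p
  | p, c :: rest, q =>
      (p.1 + c.1 < n ∧ Walk n m (p.1 + c.1, p.2) rest q) ∨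
      (p.2 + c.2 < m ∧ Walk n m (p.1, p.2 + c.2) rest q)
def stepSet (n m : Int) (S : (Int × Int) → Prop) (c : Int × Int) (q : Int × Int) : Prop :=
  ∃ p, S p ∧ ((p.1 + c.1 < n ∧ q = (p.1 + c.1, p.2)) ∨ (p.2 + c.2 < m ∧ q = (p.1, p.2 + c.2)))

theorem walk_snoc (n m : Int) (cs : List (Int × Int)) (c : Int × Int) :
    ∀ p q, Walk n m p (cs ++ [c]) q ↔ stepSet n m (Walk n m p cs) c q := by
  induction cs with
  | nil =>
    intro p q
    simp only [List.nil_append, Walk, stepSet]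
    constructor
    · rintro (⟨h, rfl⟩ | ⟨h, rfl⟩)
      · exact ⟨p, rfl, Or.inl ⟨h, rfl⟩⟩
      · exact ⟨p, rfl, Or.inr ⟨h, rfl⟩⟩
    · rintro ⟨r, rfl, (⟨h, rfl⟩ | ⟨h, rfl⟩)⟩
      · exact Or.inl ⟨h, rfl⟩
      · exact Or.inr ⟨h, rfl⟩
  | cons d ds ih =>
    intro p q
    simp only [List.cons_append, Walk, stepSet]
    constructor
    · rintro (⟨h, hw⟩ | ⟨h, hw⟩)
      · obtain ⟨r, hr, hs⟩ := (ih _ q).1 hw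
        exact ⟨r, Or.inl ⟨h, hr⟩, hs⟩
      · obtain ⟨r, hr, hs⟩ := (ih _ q).1 hw
        exact ⟨r, Or.inr ⟨h, hr⟩, hs⟩
    · rintro ⟨r, (⟨h, hr⟩ | ⟨h, hr⟩), hs⟩
      · exact Or.inl ⟨h, (ih _ q).2 ⟨r, hr, hs⟩⟩
      · exact Or.inr ⟨h, (ih _ q).2 ⟨r, hr, hs⟩⟩

theorem walk_inv (n m : Int) (cs : List (Int × Int))
    (hcs : ∀ x ∈ cs, 0 ≤ x.2) :
    ∀ p q, p.1 < max n 1 → 0 ≤ p.2 → p.2 < max m 1 →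
      Walk n m p cs q → q.1 < max n 1 ∧ 0 ≤ q.2 ∧ q.2 < max m 1 := by
  induction cs with
  | nil => rintro p q h2 h3 h4 rfl; exact ⟨h2, h3, h4⟩
  | cons d ds ih =>
    intro p q h2 h3 h4 hw
    have hd := hcs d (by simp)
    have hds : ∀ x ∈ ds, 0 ≤ x.2 := fun x hx => hcs x (by simp [hx])
    rcases hw with ⟨h, hw⟩ | ⟨h, hw⟩
    · exact ih hds (p.1 + d.1, p.2) q
        (by have := le_max_left n 1; simp; omega) h3 h4 hw
    · exact ih hds (p.1, p.2 + d.2) q h2 (by simp; omega)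
        (by have := le_max_left m 1; simp; omega) hw

def IsMinInf (P : Int → Prop) (v : Int) : Prop :=
  (v = 1000000000 ∧ ∀ x, ¬ P x) ∨ (P v ∧ (∀ x, P x → v ≤ x) ∧ v < 1000000000)

theorem isMinInf_congr {P Q : Int → Prop} {v : Int} (h : ∀ x, P x ↔ Q x)
    (hP : IsMinInf P v) : IsMinInf Q v := by
  rcases hP with ⟨rfl, he⟩ | ⟨h1, h2, h3⟩
  · exact Or.inl ⟨rfl, fun x hx => he x ((h x).2 hx)⟩
  · exact Or.inr ⟨(h v).1 h1, fun x hx => h2 x ((h x).2 hx), h3⟩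

theorem isMinInf_empty {P : Int → Prop} (h : ∀ x, ¬ P x) : IsMinInf P 1000000000 :=
  Or.inl ⟨rfl, h⟩

theorem isMinInf_union {P Q : Int → Prop} {u w : Int}
    (hP : IsMinInf P u) (hQ : IsMinInf Q w) :
    IsMinInf (fun x => P x ∨ Q x) (min u w) := by
  rcases hP with ⟨rfl, heP⟩ | ⟨hp1, hp2, hp3⟩
  · rcases hQ with ⟨rfl, heQ⟩ | ⟨hq1, hq2, hq3⟩
    · exact Or.inl ⟨by simp, fun x hx => hx.elim (heP x) (heQ x)⟩
    · refine Or.inr ⟨Or.inr ?_, fun x hx => ?_, by omega⟩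
      · simpa [min_eq_right (le_of_lt hq3)] using hq1
      · rcases hx with hx | hx
        · exact absurd hx (heP x)
        · have := hq2 x hx; omega
  · rcases hQ with ⟨rfl, heQ⟩ | ⟨hq1, hq2, hq3⟩
    · refine Or.inr ⟨Or.inl ?_, fun x hx => ?_, by omega⟩
      · simpa [min_eq_left (le_of_lt hp3)] using hp1
      · rcases hx with hx | hx
        · have := hp2 x hx; omega
        · exact absurd hx (heQ x)
    · rcases le_total u w with hle | hle
      · refine Or.inr ⟨Or.inl (by simpa [min_eq_left hle] using hp1),
          fun x hx => ?_, by omega⟩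
        rcases hx with hx | hx
        · have := hp2 x hx; omega
        · have := hq2 x hx; omega
      · refine Or.inr ⟨Or.inr (by simpa [min_eq_right hle] using hq1),
          fun x hx => ?_, by omega⟩
        rcases hx with hx | hx
        · have := hp2 x hx; omega
        · have := hq2 x hx; omega

theorem pyGetD_pySetD_int (xs : List Int) (i j v d : Int)
    (h0 : 0 ≤ i) (h : i < xs.length) (h0' : 0 ≤ j) :
    PySem.List.pyGetD (PySem.List.pySetD xs i v) j d =
      if j = i then v else PySem.List.pyGetD xs j d := by
  have hi : i = ((i.toNat : Nat) : Int) := by omega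
  have hj : j = ((j.toNat : Nat) : Int) := by omega
  rw [hi, hj, PySem.List.pyGetD_pySetD_natCast xs i.toNat j.toNat v d (by omega)]
  by_cases hij : j.toNat = i.toNat <;> simp [hij] <;> omega

def rowBody (n m : Int) (src : List Int) (c : Int × Int) (dst : List Int) (b : Int) : List Int :=
  let v := PySem.List.pyGetD src b 0
  if v = 1000000000 then dst
  else
    let dst := if v + c.1 < n then
        PySem.List.pySetD dst b (min (PySem.List.pyGetD dst b 0) (v + c.1)) else dst
    if b + c.2 < m then
        PySem.List.pySetD dst (b + c.2) (min (PySem.List.pyGetD dst (b + c.2) 0) v) else dst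

def Spart (n m : Int) (S : (Int × Int) → Prop) (c : Int × Int) (β : Int) (q : Int × Int) : Prop :=
  ∃ p, S p ∧ p.2 < β ∧
    ((p.1 + c.1 < n ∧ q = (p.1 + c.1, p.2)) ∨ (p.2 + c.2 < m ∧ q = (p.1, p.2 + c.2)))

def RowOK (m : Int) (S : (Int × Int) → Prop) (row : List Int) : Prop :=
  row.length = m.toNat ∧ ∀ j : Int, 0 ≤ j → j < m →
    IsMinInf (fun a => S (a, j)) (PySem.List.pyGetD row j 0)

theorem rowA_partial (n m : Int) (hm : 1 ≤ m) (hn : n ≤ 1000000000)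
    (c : Int × Int) (hc2 : 0 ≤ c.2)
    (S : (Int × Int) → Prop)
    (hS : ∀ p, S p → p.1 < 1000000000 ∧ 0 ≤ p.2 ∧ p.2 < m)
    (row : List Int) (hrow : RowOK m S row) :
    ∀ β : Nat, (β : Int) ≤ m →
      ((PySem.List.pyRange 0 (β : Int) 1).foldl (rowBody n m row c)
          (List.replicate m.toNat 1000000000)).length = m.toNat ∧
      ∀ j : Int, 0 ≤ j → j < m →
        IsMinInf (fun a => Spart n m S c (β : Int) (a, j))
          (PySem.List.pyGetD ((PySem.List.pyRange 0 (β : Int) 1).foldl (rowBody n m row c)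
            (List.replicate m.toNat 1000000000)) j 0) := by
  intro β
  induction β with
  | zero =>
    intro _
    simp only [Nat.cast_zero, PySem.List.pyRange_one_eq_nil (by omega : (0:Int) ≤ 0),
      List.foldl_nil]
    refine ⟨by simp, fun j h0 hj => ?_⟩
    rw [PySem.List.pyGetD_eq_getElem _ 0 h0 (by simp; omega)]
    simp only [List.getElem_replicate]
    exact isMinInf_empty (by rintro a ⟨p, hp, hlt, _⟩; have := (hS p hp).2.1; omega)
  | succ β ih =>
    intro hβ
    have hβm : (β : Int) < m := by push_cast at hβ ⊢; omega
    obtain ⟨ihlen, ihval⟩ := ih (by omega)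
    set dst := (PySem.List.pyRange 0 (β : Int) 1).foldl (rowBody n m row c)
      (List.replicate m.toNat 1000000000) with hdst
    have hfold : (PySem.List.pyRange 0 (((β:Nat)+1 : Nat) : Int) 1).foldl (rowBody n m row c)
        (List.replicate m.toNat 1000000000) = rowBody n m row c dst (β : Int) := by
      push_cast
      rw [PySem.List.pyRange_one_succ_right (by omega), List.foldl_append, List.foldl_cons,
        List.foldl_nil]
    rw [hfold]
    push_cast
    clear_value dst
    clear hdst hfold ih
    have hv := hrow.2 (β : Int) (by omega) hβm
    set v := PySem.List.pyGetD row (β : Int) 0 with hvdef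
    -- splitting the reachable-after set by the source's B-trace
    have hsplit : ∀ j a : Int, Spart n m S c ((β:Int)+1) (a, j) ↔
        ((Spart n m S c (β:Int) (a, j) ∨
          (j = (β:Int) ∧ ∃ a0, S (a0, (β:Int)) ∧ a0 + c.1 < n ∧ a = a0 + c.1)) ∨
         ((β:Int) + c.2 < m ∧ j = (β:Int) + c.2 ∧ S (a, (β:Int)))) := by
      intro j a
      constructor
      · rintro ⟨p, hp, hlt, hbr⟩
        by_cases hpβ : p.2 < (β:Int)
        · exact Or.inl (Or.inl ⟨p, hp, hpβ, hbr⟩)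
        · have hpeq : p.2 = (β:Int) := by omega
          have hp' : S (p.1, (β:Int)) := by rw [← hpeq]; simpa using hp
          rcases hbr with ⟨hg, heq⟩ | ⟨hg, heq⟩
          · have h1 : a = p.1 + c.1 := congrArg Prod.fst heq
            have h2 : j = p.2 := congrArg Prod.snd heq
            exact Or.inl (Or.inr ⟨by omega, p.1, hp', hg, h1⟩)
          · have h1 : a = p.1 := congrArg Prod.fst heq
            have h2 : j = p.2 + c.2 := congrArg Prod.snd heq
            exact Or.inr ⟨by omega, by omega, by rw [h1]; exact hp'⟩
      · rintro ((⟨p, hp, hlt, hbr⟩ | ⟨rfl, a0, ha0, hg, rfl⟩) | ⟨hg, rfl, ha⟩)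
        · exact ⟨p, hp, by omega, hbr⟩
        · exact ⟨(a0, (β:Int)), ha0, by omega, Or.inl ⟨hg, rfl⟩⟩
        · exact ⟨(a, (β:Int)), ha, by omega, Or.inr ⟨hg, rfl⟩⟩
    by_cases hvINF : v = 1000000000
    · -- no state with B-trace β: nothing changes
      have hempty : ∀ a, ¬ S (a, (β : Int)) := by
        rcases hv with ⟨_, he⟩ | ⟨h1, _, h3⟩
        · exact he
        · omega
      have hbody : rowBody n m row c dst (β : Int) = dst := by
        simp [rowBody, ← hvdef, hvINF]
      rw [hbody]
      refine ⟨ihlen, fun j h0 hj => ?_⟩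
      refine isMinInf_congr (fun a => ?_) (ihval j h0 hj)
      rw [hsplit j a]
      constructor
      · exact fun h => Or.inl (Or.inl h)
      · rintro ((h | ⟨_, a0, ha0, _⟩) | ⟨_, _, ha⟩)
        · exact h
        · exact absurd ha0 (hempty a0)
        · exact absurd ha (hempty a)
    · -- v is the least A-trace among states with B-trace β
      rcases hv with ⟨h1, _⟩ | ⟨hv1, hv2, hv3⟩
      · exact absurd h1 hvINF
      have hbody : rowBody n m row c dst (β : Int) =
          (let dst1 := if v + c.1 < n then
              PySem.List.pySetD dst (β:Int) (min (PySem.List.pyGetD dst (β:Int) 0) (v + c.1)) else dst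
           if (β:Int) + c.2 < m then
              PySem.List.pySetD dst1 ((β:Int) + c.2)
                (min (PySem.List.pyGetD dst1 ((β:Int) + c.2) 0) v) else dst1) := by
        simp [rowBody, ← hvdef, hvINF]
      rw [hbody]
      set dst1 := if v + c.1 < n then
          PySem.List.pySetD dst (β:Int) (min (PySem.List.pyGetD dst (β:Int) 0) (v + c.1)) else dst
        with hdst1
      have hlen1 : dst1.length = m.toNat := by
        rw [hdst1]; split
        · rw [PySem.List.length_pySetD, ihlen]
        · exact ihlen
      have hmid : ∀ j : Int, 0 ≤ j → j < m →
          IsMinInf (fun a => Spart n m S c (β:Int) (a, j) ∨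
            (j = (β:Int) ∧ ∃ a0, S (a0, (β:Int)) ∧ a0 + c.1 < n ∧ a = a0 + c.1))
            (PySem.List.pyGetD dst1 j 0) := by
        intro j h0 hj
        by_cases hga : v + c.1 < n
        · have hset : PySem.List.pyGetD dst1 j 0 =
              if j = (β:Int) then min (PySem.List.pyGetD dst (β:Int) 0) (v + c.1)
              else PySem.List.pyGetD dst j 0 := by
            rw [hdst1, if_pos hga]
            exact pyGetD_pySetD_int dst (β:Int) j _ 0 (by omega) (by rw [ihlen]; omega) h0
          rw [hset]
          by_cases hjβ : j = (β:Int)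
          · rw [if_pos hjβ]
            have hQ : IsMinInf (fun a => ∃ a0, S (a0, (β:Int)) ∧ a0 + c.1 < n ∧ a = a0 + c.1)
                (v + c.1) := by
              refine Or.inr ⟨⟨v, hv1, hga, rfl⟩, ?_, by omega⟩
              rintro x ⟨a0, ha0, _, rfl⟩
              have := hv2 a0 ha0; omega
            refine isMinInf_congr (fun a => ?_) (isMinInf_union (ihval (β:Int) (by omega) hβm) hQ)
            rw [hjβ]
            constructor
            · rintro (h | h); exacts [Or.inl h, Or.inr ⟨rfl, h⟩]
            · rintro (h | ⟨_, h⟩); exacts [Or.inl h, Or.inr h]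
          · rw [if_neg hjβ]
            refine isMinInf_congr (fun a => ?_) (ihval j h0 hj)
            constructor
            · exact Or.inl
            · rintro (h | ⟨hj', _⟩); exacts [h, absurd hj' hjβ]
        · have hdst1e : dst1 = dst := by rw [hdst1, if_neg hga]
          rw [hdst1e]
          refine isMinInf_congr (fun a => ?_) (ihval j h0 hj)
          constructor
          · exact Or.inl
          · rintro (h | ⟨_, a0, ha0, hlt, rfl⟩)
            · exact h
            · have := hv2 a0 ha0; omega
      clear_value dst1
      clear hdst1
      by_cases hgb : (β:Int) + c.2 < m
      · rw [if_pos hgb]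
        refine ⟨by rw [PySem.List.length_pySetD, hlen1], fun j h0 hj => ?_⟩
        have hset : PySem.List.pyGetD (PySem.List.pySetD dst1 ((β:Int) + c.2)
            (min (PySem.List.pyGetD dst1 ((β:Int) + c.2) 0) v)) j 0 =
            if j = (β:Int) + c.2 then min (PySem.List.pyGetD dst1 ((β:Int) + c.2) 0) v
            else PySem.List.pyGetD dst1 j 0 :=
          pyGetD_pySetD_int dst1 ((β:Int) + c.2) j _ 0 (by omega) (by rw [hlen1]; omega) h0
        rw [hset]
        by_cases hjb : j = (β:Int) + c.2
        · rw [if_pos hjb]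
          have hQ : IsMinInf (fun a => S (a, (β:Int))) v := Or.inr ⟨hv1, hv2, hv3⟩
          refine isMinInf_congr (fun a => ?_) (isMinInf_union (hmid ((β:Int) + c.2) (by omega) hgb) hQ)
          rw [hsplit j a, hjb]
          constructor
          · rintro (h | h); exacts [Or.inl h, Or.inr ⟨hgb, rfl, h⟩]
          · rintro (h | ⟨_, _, h⟩); exacts [Or.inl h, Or.inr h]
        · rw [if_neg hjb]
          refine isMinInf_congr (fun a => ?_) (hmid j h0 hj)
          rw [hsplit j a]
          constructor
          · exact Or.inl
          · rintro (h | ⟨_, hj', _⟩); exacts [h, absurd hj' hjb]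
      · rw [if_neg hgb]
        refine ⟨hlen1, fun j h0 hj => ?_⟩
        refine isMinInf_congr (fun a => ?_) (hmid j h0 hj)
        rw [hsplit j a]
        constructor
        · exact Or.inl
        · rintro (h | ⟨hg, _, _⟩); exacts [h, absurd hg hgb]

def rowA (n m : Int) (src : List Int) (c : Int × Int) : List Int :=
  (PySem.List.pyRange 0 m 1).foldl (rowBody n m src c) (List.replicate m.toNat 1000000000)

def row0 (m : Int) : List Int := (List.replicate m.toNat (1000000000 : Int)).set 0 0

def rowsA (n m : Int) (cs : List (Int × Int)) : List Int := cs.foldl (rowA n m) (row0 m)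

theorem rowA_char (n m : Int) (hm : 1 ≤ m) (hn : n ≤ 1000000000)
    (c : Int × Int) (hc2 : 0 ≤ c.2)
    (S : (Int × Int) → Prop)
    (hS : ∀ p, S p → p.1 < 1000000000 ∧ 0 ≤ p.2 ∧ p.2 < m)
    (row : List Int) (h : RowOK m S row) :
    RowOK m (stepSet n m S c) (rowA n m row c) := by
  have hcast : ((m.toNat : Nat) : Int) = m := by omega
  obtain ⟨hlen, hval⟩ := rowA_partial n m hm hn c hc2 S hS row h m.toNat (by omega)
  rw [hcast] at hlen hval
  refine ⟨hlen, fun j h0 hj => ?_⟩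
  refine isMinInf_congr (fun a => ?_) (hval j h0 hj)
  constructor
  · rintro ⟨p, hp, _, hbr⟩; exact ⟨p, hp, hbr⟩
  · rintro ⟨p, hp, hbr⟩; exact ⟨p, hp, (hS p hp).2.2, hbr⟩

theorem rowsA_char (n m : Int) (hm : 1 ≤ m) (hn : n ≤ 1000000000)
    (cs : List (Int × Int)) (hcs : ∀ x ∈ cs, 0 ≤ x.2) :
    RowOK m (Walk n m (0, 0) cs) (rowsA n m cs) := by
  induction cs using List.reverseRecOn with
  | nil =>
    refine ⟨by simp [rowsA, row0], fun j h0 hj => ?_⟩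
    have hjlen : j.toNat < (List.replicate m.toNat (1000000000:Int)).length := by simp; omega
    have hget : PySem.List.pyGetD (rowsA n m []) j 0 = if j.toNat = 0 then 0 else 1000000000 := by
      rw [PySem.List.pyGetD_eq_getElem _ 0 h0 (by simp [rowsA, row0, List.length_set, List.length_replicate]; omega)]
      simp only [rowsA, List.foldl_nil, row0]
      rw [List.getElem_set]
      rcases Nat.eq_zero_or_pos j.toNat with h00 | h00
      · simp [h00]
      · rw [if_neg (by omega), if_neg (by omega)]
        simp
    by_cases hj0 : j = 0
    · subst hj0
      rw [hget]
      rw [if_pos (show ((0:Int).toNat = 0) from rfl)]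
      refine Or.inr ⟨rfl, ?_, by omega⟩
      rintro x hx
      have : x = 0 := by simpa [Walk, Prod.ext_iff] using hx
      omega
    · rw [hget, if_neg (by omega)]
      refine isMinInf_empty ?_
      rintro a hx
      have : a = 0 ∧ j = 0 := by simpa [Walk, Prod.ext_iff] using hx
      exact hj0 this.2
  | append_singleton cs c ih =>
    have hcs' : ∀ x ∈ cs, 0 ≤ x.2 := fun x hx => hcs x (by simp [hx])
    have hc := hcs c (by simp)
    have hrow := ih hcs'
    have hstep := rowA_char n m hm hn c hc (Walk n m (0,0) cs)
      (fun p hp => by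
        have := walk_inv n m cs hcs' (0,0) p (lt_max_of_lt_right one_pos) le_rfl
          (lt_max_of_lt_right one_pos) hp
        refine ⟨by have := le_max_left n 1; omega, this.2.1, ?_⟩
        have : p.2 < max m 1 := this.2.2
        omega)
      (rowsA n m cs) hrow
    have hfold : rowsA n m (cs ++ [c]) = rowA n m (rowsA n m cs) c := by
      simp [rowsA, List.foldl_append]
    rw [hfold]
    refine ⟨hstep.1, fun j h0 hj => ?_⟩
    refine isMinInf_congr (fun a => ?_) (hstep.2 j h0 hj)
    exact ((walk_snoc n m cs c (0,0) (a, j)).symm)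

theorem getD_set_ne' (l : List (List Int)) (i j : Nat) (v : List Int) (h : i ≠ j) :
    (l.set i v).getD j [] = l.getD j [] := by
  simp [List.getD, List.getElem?_set_ne h]

theorem getD_set_self' (l : List (List Int)) (i : Nat) (v : List Int) (h : i < l.length) :
    (l.set i v).getD i [] = v := by
  simp [List.getD, h]

theorem inner_extract (n m ca cb : Int) (src : List Int) :
    ∀ (bs : List Int) (T : List (List Int)) (i : Nat), i + 1 < T.length →
      T.getD i [] = src →
      bs.foldl (fun dp b =>
        let v := PySem.List.pyGetD (PySem.List.pyGetD dp (i:Int) []) b 0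
        if v = 1000000000 then dp
        else
          let dp := if v + ca < n then
              PySem.List.pySetD dp ((i:Int)+1) (PySem.List.pySetD (PySem.List.pyGetD dp ((i:Int)+1) []) b
                (min (PySem.List.pyGetD (PySem.List.pyGetD dp ((i:Int)+1) []) b 0) (v + ca)))
            else dp
          if b + cb < m then
              PySem.List.pySetD dp ((i:Int)+1) (PySem.List.pySetD (PySem.List.pyGetD dp ((i:Int)+1) []) (b + cb)
                (min (PySem.List.pyGetD (PySem.List.pyGetD dp ((i:Int)+1) []) (b + cb) 0) v))
            else dp) T
      = T.set (i+1) (bs.foldl (rowBody n m src (ca, cb)) (T.getD (i+1) [])) := by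
  intro bs
  induction bs with
  | nil =>
    intro T i hlen hsrc
    simp only [List.foldl_nil]
    rw [List.getD_eq_getElem _ _ hlen]
    exact (List.set_getElem_self hlen).symm
  | cons b bs ih =>
    intro T i hlen hsrc
    simp only [List.foldl_cons]
    have hcast : ((i:Int)+1) = ((i+1 : Nat) : Int) := by push_cast; ring
    have hpySetD' : ∀ (L : List (List Int)) (r : List Int),
        PySem.List.pySetD L ((i:Int)+1) r = L.set (i+1) r := fun L r => by
      rw [hcast, PySem.List.pySetD_natCast]
    have hgetT : PySem.List.pyGetD T (i:Int) [] = src := by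
      rw [PySem.List.pyGetD_natCast]; exact hsrc
    set v := PySem.List.pyGetD src b 0 with hv
    by_cases hvINF : v = 1000000000
    · rw [if_pos (by rw [hgetT, ← hv]; exact hvINF)]
      rw [ih T i hlen hsrc]
      have : rowBody n m src (ca, cb) (T.getD (i+1) []) b = T.getD (i+1) [] := by
        simp [rowBody, ← hv, hvINF]
      rw [this]
    · have hvne : PySem.List.pyGetD (PySem.List.pyGetD T (i:Int) []) b 0 ≠ 1000000000 := by
        rw [hgetT, ← hv]; exact hvINF
      rw [if_neg hvne]
      -- the one-step table update equals setting row i+1 to the one-step row update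
      set r0 := T.getD (i+1) [] with hr0
      have hgetT1 : PySem.List.pyGetD T ((i:Int)+1) [] = r0 := by
        rw [hcast, PySem.List.pyGetD_natCast]
      set T1 := if v + ca < n then
          T.set (i+1) (PySem.List.pySetD r0 b (min (PySem.List.pyGetD r0 b 0) (v + ca))) else T
        with hT1
      set r1 := if v + ca < n then
          PySem.List.pySetD r0 b (min (PySem.List.pyGetD r0 b 0) (v + ca)) else r0 with hr1
      have hT1eq : (if v + ca < n then
          PySem.List.pySetD T ((i:Int)+1) (PySem.List.pySetD (PySem.List.pyGetD T ((i:Int)+1) []) b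
            (min (PySem.List.pyGetD (PySem.List.pyGetD T ((i:Int)+1) []) b 0) (v + ca)))
        else T) = T1 := by
        rw [hT1]
        split
        · rw [hgetT1, hcast, PySem.List.pySetD_natCast]
        · rfl
      have hT1len : i + 1 < T1.length := by
        rw [hT1]; split
        · simpa using hlen
        · exact hlen
      have hT1src : T1.getD i [] = src := by
        rw [hT1]; split
        · rw [getD_set_ne' _ _ _ _ (by omega)]; exact hsrc
        · exact hsrc
      have hT1row : T1.getD (i+1) [] = r1 := by
        rw [hT1, hr1]; split
        · exact getD_set_self' _ _ _ hlen
        · rfl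
      have hT1set : ∀ r : List Int, T1.set (i+1) r = T.set (i+1) r := by
        intro r
        rw [hT1]; split
        · exact List.set_set ..
        · rfl
      have hgetT1' : PySem.List.pyGetD T1 ((i:Int)+1) [] = r1 := by
        rw [hcast, PySem.List.pyGetD_natCast]; exact hT1row
      rw [hgetT, ← hv, hT1eq]
      by_cases hgb : b + cb < m
      · rw [if_pos hgb]
        rw [hgetT1', hpySetD']
        rw [ih (T1.set (i+1) (PySem.List.pySetD r1 (b + cb) (min (PySem.List.pyGetD r1 (b+cb) 0) v))) i
          (by simpa using hT1len)
          (by rw [getD_set_ne' _ _ _ _ (by omega)]; exact hT1src)]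
        rw [getD_set_self' _ _ _ hT1len]
        rw [List.set_set, hT1set]
        congr 2
        simp only [rowBody, ← hv, ← hr0]
        rw [if_neg hvINF]
        simp only [← hr1]
        rw [if_pos hgb]
      · rw [if_neg hgb]
        rw [ih T1 i hT1len hT1src]
        rw [hT1set, hT1row]
        congr 2
        simp only [rowBody, ← hv, ← hr0]
        rw [if_neg hvINF]
        simp only [← hr1]
        rw [if_neg hgb]

def itemsOf (info : List (List Int)) : List (Int × Int) :=
  info.map (fun r => (PySem.List.pyGetD r 0 0, PySem.List.pyGetD r 1 0))

theorem outer_inv (info : List (List Int)) (n m : Int) :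
    ∀ k : Nat, k ≤ info.length →
      ((PySem.List.pyRange 0 (k : Int) 1).foldl (fun dp i =>
          let row := PySem.List.pyGetD info i []
          let cost_a := PySem.List.pyGetD row 0 0
          let cost_b := PySem.List.pyGetD row 1 0
          (PySem.List.pyRange 0 m 1).foldl (fun dp b =>
            let v := PySem.List.pyGetD (PySem.List.pyGetD dp i []) b 0
            if v = 1000000000 then dp
            else
              let dp := if v + cost_a < n then
                  PySem.List.pySetD dp (i+1) (PySem.List.pySetD (PySem.List.pyGetD dp (i+1) []) b
                    (min (PySem.List.pyGetD (PySem.List.pyGetD dp (i+1) []) b 0) (v + cost_a)))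
                else dp
              if b + cost_b < m then
                  PySem.List.pySetD dp (i+1) (PySem.List.pySetD (PySem.List.pyGetD dp (i+1) []) (b + cost_b)
                    (min (PySem.List.pyGetD (PySem.List.pyGetD dp (i+1) []) (b + cost_b) 0) v))
                else dp) dp)
        ((List.replicate (info.length + 1) (List.replicate m.toNat (1000000000:Int))).set 0 (row0 m))).length
        = info.length + 1 ∧
      ((PySem.List.pyRange 0 (k : Int) 1).foldl (fun dp i =>
          let row := PySem.List.pyGetD info i []
          let cost_a := PySem.List.pyGetD row 0 0
          let cost_b := PySem.List.pyGetD row 1 0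
          (PySem.List.pyRange 0 m 1).foldl (fun dp b =>
            let v := PySem.List.pyGetD (PySem.List.pyGetD dp i []) b 0
            if v = 1000000000 then dp
            else
              let dp := if v + cost_a < n then
                  PySem.List.pySetD dp (i+1) (PySem.List.pySetD (PySem.List.pyGetD dp (i+1) []) b
                    (min (PySem.List.pyGetD (PySem.List.pyGetD dp (i+1) []) b 0) (v + cost_a)))
                else dp
              if b + cost_b < m then
                  PySem.List.pySetD dp (i+1) (PySem.List.pySetD (PySem.List.pyGetD dp (i+1) []) (b + cost_b)
                    (min (PySem.List.pyGetD (PySem.List.pyGetD dp (i+1) []) (b + cost_b) 0) v))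
                else dp) dp)
        ((List.replicate (info.length + 1) (List.replicate m.toNat (1000000000:Int))).set 0 (row0 m))).getD k []
        = rowsA n m ((itemsOf info).take k) ∧
      ∀ j : Nat, k < j → j ≤ info.length →
      ((PySem.List.pyRange 0 (k : Int) 1).foldl (fun dp i =>
          let row := PySem.List.pyGetD info i []
          let cost_a := PySem.List.pyGetD row 0 0
          let cost_b := PySem.List.pyGetD row 1 0
          (PySem.List.pyRange 0 m 1).foldl (fun dp b =>
            let v := PySem.List.pyGetD (PySem.List.pyGetD dp i []) b 0
            if v = 1000000000 then dp
            else
              let dp := if v + cost_a < n then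
                  PySem.List.pySetD dp (i+1) (PySem.List.pySetD (PySem.List.pyGetD dp (i+1) []) b
                    (min (PySem.List.pyGetD (PySem.List.pyGetD dp (i+1) []) b 0) (v + cost_a)))
                else dp
              if b + cost_b < m then
                  PySem.List.pySetD dp (i+1) (PySem.List.pySetD (PySem.List.pyGetD dp (i+1) []) (b + cost_b)
                    (min (PySem.List.pyGetD (PySem.List.pyGetD dp (i+1) []) (b + cost_b) 0) v))
                else dp) dp)
        ((List.replicate (info.length + 1) (List.replicate m.toNat (1000000000:Int))).set 0 (row0 m))).getD j []
        = List.replicate m.toNat (1000000000:Int) := by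
  intro k
  induction k with
  | zero =>
    intro _
    simp only [Nat.cast_zero, PySem.List.pyRange_one_eq_nil (le_refl (0:Int)), List.foldl_nil]
    refine ⟨by simp, ?_, ?_⟩
    · rw [List.take_zero]
      show _ = row0 m
      exact getD_set_self' _ _ _ (by simp)
    · intro j hj0 hjL
      rw [getD_set_ne' _ _ _ _ (by omega)]
      rw [List.getD_eq_getElem _ _ (by simp; omega)]
      simp
  | succ k ih =>
    intro hk1
    obtain ⟨ihlen, ihrow, ihrest⟩ := ih (by omega)
    have hsucc : (((k+1 : Nat)) : Int) = (k : Int) + 1 := by push_cast; ring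
    rw [hsucc, PySem.List.pyRange_one_succ_right (by omega), List.foldl_append, List.foldl_cons,
      List.foldl_nil]
    -- name the table after k steps
    set T := (PySem.List.pyRange 0 (k : Int) 1).foldl _ _ with hT
    have hTlen : k + 1 < T.length := by rw [ihlen]; omega
    rw [inner_extract n m _ _ (rowsA n m ((itemsOf info).take k)) (PySem.List.pyRange 0 m 1) T k
      hTlen ihrow]
    have hrowk1 : T.getD (k+1) [] = List.replicate m.toNat 1000000000 :=
      ihrest (k+1) (by omega) (by omega)
    rw [hrowk1]
    have hrowA : (PySem.List.pyRange 0 m 1).foldl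
        (rowBody n m (rowsA n m ((itemsOf info).take k))
          (PySem.List.pyGetD (PySem.List.pyGetD info (k:Int) []) 0 0,
           PySem.List.pyGetD (PySem.List.pyGetD info (k:Int) []) 1 0))
        (List.replicate m.toNat 1000000000)
        = rowsA n m ((itemsOf info).take (k+1)) := by
      have hkL : k < (itemsOf info).length := by simp [itemsOf]; omega
      have htake : (itemsOf info).take (k+1) = (itemsOf info).take k ++ [(itemsOf info)[k]] :=
        List.take_succ_eq_append_getElem hkL
      have hitem : (itemsOf info)[k] =
          (PySem.List.pyGetD (PySem.List.pyGetD info (k:Int) []) 0 0,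
           PySem.List.pyGetD (PySem.List.pyGetD info (k:Int) []) 1 0) := by
        simp [itemsOf, List.getD, List.getElem?_eq_getElem (show k < info.length from by omega)]
      rw [htake]
      simp only [rowsA]
      rw [List.foldl_append, List.foldl_cons, List.foldl_nil, hitem]
      rfl
    rw [hrowA]
    refine ⟨by simpa using ihlen, ?_, ?_⟩
    · exact getD_set_self' _ _ _ (by omega)
    · intro j hj hjL
      rw [getD_set_ne' _ _ _ _ (by omega)]
      exact ihrest j (by omega) hjL

theorem solution_eq (info : List (List Int)) (n m : Int) :
    solution info n m =
      (if (PySem.List.min? (rowsA n m (itemsOf info)) (fun x => x)).getD 0 ≠ 1000000000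
       then (PySem.List.min? (rowsA n m (itemsOf info)) (fun x => x)).getD 0 else -1) := by
  simp only [solution]
  have hinit : PySem.List.pySetD
      ((PySem.List.pyRange 0 (PySem.List.len info + 1) 1).map (fun _ => List.replicate m.toNat (1000000000:Int))) 0
      (PySem.List.pySetD (PySem.List.pyGetD
        ((PySem.List.pyRange 0 (PySem.List.len info + 1) 1).map (fun _ => List.replicate m.toNat (1000000000:Int))) 0 []) 0 0)
      = (List.replicate (info.length + 1) (List.replicate m.toNat (1000000000:Int))).set 0 (row0 m) := by
    have hmap : (PySem.List.pyRange 0 (PySem.List.len info + 1) 1).map (fun _ => List.replicate m.toNat (1000000000:Int))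
        = List.replicate (info.length + 1) (List.replicate m.toNat (1000000000:Int)) := by
      rw [List.map_const']
      congr 1
      rw [PySem.List.length_pyRange_one]
      simp [PySem.List.len]
    rw [hmap]
    rw [List.replicate_succ]
    rw [PySem.List.pySetD_of_nonneg _ _ (le_refl 0), PySem.List.pySetD_of_nonneg _ _ (le_refl 0)]
    congr 1
    rw [PySem.List.pyGetD_zero_cons]
    rfl
  rw [hinit]
  have hlen : PySem.List.len info = ((info.length : Nat) : Int) := by simp [PySem.List.len]
  rw [hlen]
  rw [PySem.List.pyGetD_natCast]
  rw [(outer_inv info n m info.length le_rfl).2.1]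
  rw [List.take_of_length_le (by simp [itemsOf])]

def stepB (n m : Int) (S : PySem.Set (Int × Int)) (c : Int × Int) : PySem.Set (Int × Int) :=
  S.foldl (fun nxt p =>
    let nxt := if p.1 + c.1 < n then PySem.Set.add nxt (p.1 + c.1, p.2) else nxt
    if p.2 + c.2 < m then PySem.Set.add nxt (p.1, p.2 + c.2) else nxt) PySem.Set.empty

theorem solution_alt_eq (info : List (List Int)) (n m : Int) :
    solution_alt info n m = PySem.List.minD
      (((itemsOf info).foldl (stepB n m) (PySem.Set.ofList [((0:Int), (0:Int))])).map (fun p => p.1))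
      (fun x => x) (-1) := by
  simp only [solution_alt]
  rw [itemsOf, List.foldl_map]
  rfl

theorem mem_foldl_add (n m : Int) (c : Int × Int) :
    ∀ (S acc : List (Int × Int)) (q : Int × Int),
      q ∈ S.foldl (fun nxt p =>
        let nxt := if p.1 + c.1 < n then PySem.Set.add nxt (p.1 + c.1, p.2) else nxt
        if p.2 + c.2 < m then PySem.Set.add nxt (p.1, p.2 + c.2) else nxt) acc ↔
      q ∈ acc ∨ ∃ p ∈ S, ((p.1 + c.1 < n ∧ q = (p.1 + c.1, p.2)) ∨ (p.2 + c.2 < m ∧ q = (p.1, p.2 + c.2))) := by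
  intro S
  induction S with
  | nil => simp
  | cons p S ih =>
    intro acc q
    simp only [List.foldl_cons]
    rw [ih]
    constructor
    · rintro (hq | ⟨p', hp', hbr⟩)
      · -- q in the one-step accumulator
        by_cases h2 : p.2 + c.2 < m
        · rw [if_pos h2, PySem.Set.mem_add] at hq
          rcases hq with hq | rfl
          · by_cases h1 : p.1 + c.1 < n
            · rw [if_pos h1, PySem.Set.mem_add] at hq
              rcases hq with hq | rfl
              · exact Or.inl hq
              · exact Or.inr ⟨p, by simp, Or.inl ⟨h1, rfl⟩⟩
            · rw [if_neg h1] at hq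
              exact Or.inl hq
          · exact Or.inr ⟨p, by simp, Or.inr ⟨h2, rfl⟩⟩
        · rw [if_neg h2] at hq
          by_cases h1 : p.1 + c.1 < n
          · rw [if_pos h1, PySem.Set.mem_add] at hq
            rcases hq with hq | rfl
            · exact Or.inl hq
            · exact Or.inr ⟨p, by simp, Or.inl ⟨h1, rfl⟩⟩
          · rw [if_neg h1] at hq
            exact Or.inl hq
      · exact Or.inr ⟨p', by simp [hp'], hbr⟩
    · rintro (hq | ⟨p', hp', hbr⟩)
      · left
        by_cases h2 : p.2 + c.2 < m
        · rw [if_pos h2, PySem.Set.mem_add]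
          left
          by_cases h1 : p.1 + c.1 < n
          · rw [if_pos h1, PySem.Set.mem_add]; exact Or.inl hq
          · rw [if_neg h1]; exact hq
        · rw [if_neg h2]
          by_cases h1 : p.1 + c.1 < n
          · rw [if_pos h1, PySem.Set.mem_add]; exact Or.inl hq
          · rw [if_neg h1]; exact hq
      · rcases List.mem_cons.1 hp' with rfl | hp'
        · -- p' is the head: its contributions are in the accumulator
          left
          rcases hbr with ⟨h1, rfl⟩ | ⟨h2, rfl⟩
          · by_cases h2 : p'.2 + c.2 < m
            · rw [if_pos h2, PySem.Set.mem_add]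
              exact Or.inl (by rw [if_pos h1, PySem.Set.mem_add]; exact Or.inr rfl)
            · rw [if_neg h2, if_pos h1, PySem.Set.mem_add]
              exact Or.inr rfl
          · rw [if_pos h2, PySem.Set.mem_add]
            exact Or.inr rfl
        · exact Or.inr ⟨p', hp', hbr⟩

theorem mem_stepB (n m : Int) (c : Int × Int) (S : PySem.Set (Int × Int)) (q : Int × Int) :
    q ∈ stepB n m S c ↔
      ∃ p ∈ S, ((p.1 + c.1 < n ∧ q = (p.1 + c.1, p.2)) ∨ (p.2 + c.2 < m ∧ q = (p.1, p.2 + c.2))) := by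
  rw [stepB, mem_foldl_add]
  simp [PySem.Set.empty]

theorem memB (n m : Int) :
    ∀ (cs : List (Int × Int)) (S : PySem.Set (Int × Int)) (q : Int × Int),
      q ∈ cs.foldl (stepB n m) S ↔ ∃ p ∈ S, Walk n m p cs q := by
  intro cs
  induction cs with
  | nil =>
    intro S q
    simp only [List.foldl_nil, Walk]
    constructor
    · intro h; exact ⟨q, h, rfl⟩
    · rintro ⟨p, hp, rfl⟩; exact hp
  | cons c cs ih =>
    intro S q
    rw [List.foldl_cons, ih]
    constructor
    · rintro ⟨p', hp', hw⟩
      rw [mem_stepB] at hp'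
      obtain ⟨p, hp, hbr⟩ := hp'
      refine ⟨p, hp, ?_⟩
      rcases hbr with ⟨h1, rfl⟩ | ⟨h2, rfl⟩
      · exact Or.inl ⟨h1, hw⟩
      · exact Or.inr ⟨h2, hw⟩
    · rintro ⟨p, hp, (⟨h1, hw⟩ | ⟨h2, hw⟩)⟩
      · exact ⟨(p.1 + c.1, p.2), (mem_stepB n m c S _).2 ⟨p, hp, Or.inl ⟨h1, rfl⟩⟩, hw⟩
      · exact ⟨(p.1, p.2 + c.2), (mem_stepB n m c S _).2 ⟨p, hp, Or.inr ⟨h2, rfl⟩⟩, hw⟩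

theorem walk_bounds_zero (n m : Int) (hm : 1 ≤ m) (hn : n ≤ 1000000000)
    (cs : List (Int × Int)) (hcs : ∀ x ∈ cs, 0 ≤ x.2) :
    ∀ p, Walk n m (0, 0) cs p → p.1 < 1000000000 ∧ 0 ≤ p.2 ∧ p.2 < m := by
  intro p hp
  have h := walk_inv n m cs hcs (0,0) p (lt_max_of_lt_right one_pos) le_rfl
    (lt_max_of_lt_right one_pos) hp
  have hmax1 : max n 1 ≤ 1000000000 := max_le hn (by norm_num)
  have hmax2 : max m 1 = m := max_eq_left hm
  exact ⟨by omega, h.2.1, by rw [← hmax2]; exact h.2.2⟩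

theorem final_eq (info : List (List Int)) (n m : Int) (hm : 1 ≤ m) (hn : n ≤ 1000000000)
    (hitems : ∀ c ∈ itemsOf info, 0 ≤ c.2) :
    solution info n m = solution_alt info n m := by
  rw [solution_eq, solution_alt_eq]
  set cs := itemsOf info with hcs
  set row := rowsA n m cs with hrowdef
  have hrow := rowsA_char n m hm hn cs hitems
  have hbounds := walk_bounds_zero n m hm hn cs hitems
  set Slist := cs.foldl (stepB n m) (PySem.Set.ofList [((0:Int), (0:Int))]) with hSlist
  have hmem : ∀ q, q ∈ Slist ↔ Walk n m (0, 0) cs q := by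
    intro q
    rw [hSlist, memB]
    constructor
    · rintro ⟨p, hp, hw⟩
      have hp' : p = (0, 0) := by simpa using (PySem.Set.mem_ofList _ _).1 hp
      rwa [hp'] at hw
    · intro hw
      exact ⟨(0, 0), (PySem.Set.mem_ofList _ _).2 (by simp), hw⟩
  have hrowlen : row.length = m.toNat := hrow.1
  have hrowne : row ≠ [] := by
    intro h; rw [h] at hrowlen; simp at hrowlen; omega
  -- characterize every entry of row
  have hentry : ∀ j : Nat, j < m.toNat →
      IsMinInf (fun a => Walk n m (0,0) cs (a, (j : Int))) (row.getD j 0) := by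
    intro j hj
    have h := hrow.2 (j : Int) (by omega) (by omega)
    rwa [PySem.List.pyGetD_natCast] at h
  obtain ⟨r0, rrest, hrowc⟩ : ∃ r0 rrest, row = r0 :: rrest := by
    cases hrc : row with
    | nil => exact absurd hrc hrowne
    | cons a l => exact ⟨a, l, rfl⟩
  have hminrow : PySem.List.min? row (fun x => x) = some (rrest.foldl min r0) := by
    rw [hrowc]; exact PySem.List.min?_id_cons ..
  set v := rrest.foldl min r0 with hvdef
  have hvmem : v ∈ row := PySem.List.min?_mem hminrow
  have hvmin : ∀ y ∈ row, v ≤ y := PySem.List.min?_isMin hminrow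
  -- any member of row is an entry
  have hmement : ∀ y ∈ row, ∃ j : Nat, j < m.toNat ∧ y = row.getD j 0 := by
    intro y hy
    obtain ⟨j, hj, hjy⟩ := List.mem_iff_getElem.1 hy
    exact ⟨j, by omega, by rw [List.getD_eq_getElem _ _ hj, hjy]⟩
  by_cases hS : Slist = []
  · have hempty : ∀ q, ¬ Walk n m (0,0) cs q := by
      intro q hq
      rw [← hmem] at hq
      rw [hS] at hq
      simp at hq
    have hvINF : v = 1000000000 := by
      obtain ⟨j, hj, hjy⟩ := hmement v hvmem
      have := hentry j hj
      rcases this with ⟨hINF, _⟩ | ⟨harm, _, _⟩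
      · exact hjy.trans hINF
      · exact absurd harm (hempty _)
    rw [hminrow, hvINF, hS]
    simp
  · obtain ⟨q0, hq0mem⟩ := List.exists_mem_of_ne_nil Slist hS
    have hq0 : Walk n m (0,0) cs q0 := (hmem q0).1 hq0mem
    have hq0b := hbounds q0 hq0
    -- the entry at q0's B-trace is a real minimum, hence < INF
    have hq0ent : row.getD q0.2.toNat 0 < 1000000000 ∧
        Walk n m (0,0) cs (row.getD q0.2.toNat 0, q0.2) := by
      have hj : q0.2.toNat < m.toNat := by omega
      have hcast : ((q0.2.toNat : Nat) : Int) = q0.2 := by omega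
      have := hentry q0.2.toNat hj
      rw [hcast] at this
      rcases this with ⟨_, hemp⟩ | ⟨harm, _, hlt⟩
      · exact absurd (show Walk n m (0,0) cs (q0.1, q0.2) by simpa using hq0) (hemp q0.1)
      · exact ⟨hlt, harm⟩
    -- v is the global minimum A-trace and is itself realized
    have hvle : ∀ a b : Int, Walk n m (0,0) cs (a, b) → v ≤ a := by
      intro a b hw
      have hb := hbounds (a, b) hw
      have hj : b.toNat < m.toNat := by simp at hb; omega
      have hcast : ((b.toNat : Nat) : Int) = b := by simp at hb; omega
      have := hentry b.toNat hj
      rw [hcast] at this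
      have hmem' : row.getD b.toNat 0 ∈ row := by
        rw [List.getD_eq_getElem _ _ (by omega)]
        exact List.getElem_mem _
      rcases this with ⟨_, hemp⟩ | ⟨_, hlb, _⟩
      · exact absurd hw (hemp a)
      · exact le_trans (hvmin _ hmem') (hlb a hw)
    have hvwalk : ∃ b : Int, Walk n m (0,0) cs (v, b) := by
      obtain ⟨j, hj, hjy⟩ := hmement v hvmem
      have := hentry j hj
      rcases this with ⟨hINF, _⟩ | ⟨harm, _, _⟩
      · -- v = INF impossible: v ≤ entry at q0.2 < INF
        exfalso
        have hle : v ≤ row.getD q0.2.toNat 0 := hvmin _ (by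
          rw [List.getD_eq_getElem _ _ (by omega)]
          exact List.getElem_mem _)
        rw [← hjy] at hINF
        omega
      · exact ⟨(j : Int), by rwa [← hjy] at harm⟩
    have hvlt : v < 1000000000 := by
      have hle : v ≤ row.getD q0.2.toNat 0 := hvmin _ (by
        rw [List.getD_eq_getElem _ _ (by omega)]
        exact List.getElem_mem _)
      omega
    rw [hminrow]
    simp only [Option.getD_some, ← hvdef]
    rw [if_pos (by omega : v ≠ 1000000000)]
    -- now the B side
    obtain ⟨w0, wrest, hmapc⟩ : ∃ w0 wrest, Slist.map (fun p => p.1) = w0 :: wrest := by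
      cases hmc : Slist.map (fun p => p.1) with
      | nil => exact absurd (List.map_eq_nil_iff.1 hmc) hS
      | cons a l => exact ⟨a, l, rfl⟩
    have hminmap : PySem.List.min? (Slist.map (fun p => p.1)) (fun x => x)
        = some (wrest.foldl min w0) := by
      rw [hmapc]; exact PySem.List.min?_id_cons ..
    set w := wrest.foldl min w0 with hwdef
    have hwmem : w ∈ Slist.map (fun p => p.1) := PySem.List.min?_mem hminmap
    have hwmin : ∀ y ∈ Slist.map (fun p => p.1), w ≤ y := PySem.List.min?_isMin hminmap
    have hBval : PySem.List.minD (Slist.map (fun p => p.1)) (fun x => x) (-1) = w := by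
      show (PySem.List.min? (Slist.map (fun p => p.1)) (fun x => x)).getD (-1) = w
      rw [hminmap]; rfl
    rw [hBval]
    -- v = w
    obtain ⟨p, hpmem, hpw⟩ := List.mem_map.1 hwmem
    have hwwalk : Walk n m (0,0) cs (w, p.2) := by
      have h : Walk n m (0,0) cs (p.1, p.2) := by simpa using (hmem p).1 hpmem
      rwa [hpw] at h
    obtain ⟨b, hvb⟩ := hvwalk
    have hvmemmap : v ∈ Slist.map (fun p => p.1) :=
      List.mem_map.2 ⟨(v, b), (hmem _).2 hvb, rfl⟩
    have h1 : v ≤ w := hvle w p.2 hwwalk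
    have h2 : w ≤ v := hwmin v hvmemmap
    omega

-- ===== VERDICT (by name: the statement is the Claim_ definition above) =====
theorem solution_spec : Claim_equal_solution := by
  intro info n m _ hpre
  show solution info n m = solution_alt info n m
  refine final_eq info n m hpre.1 hpre.2.1 ?_
  intro c hc
  obtain ⟨r, hr, rfl⟩ := List.mem_map.1 hc
  obtain ⟨hlen, hpos⟩ := hpre.2.2 r hr
  show 0 ≤ PySem.List.pyGetD r 1 0
  have hg : PySem.List.pyGetD r 1 0 = r.getD 1 0 := by
    rw [PySem.List.pyGetD_eq_getElem _ _ (by omega) (by omega),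
      List.getD_eq_getElem _ _ (by omega)]
    norm_num
  rw [hg]
  exact hpos
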